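-- pv_equiv track=rewrite | github.com/vindomestic-oss/m_a | reader/motif_analysis.py | _merge_ornamental_slurs
-- ===== SOURCE A (Python) =====
-- def _merge_ornamental_slurs(notes, slur_ends):
--     """
--     Detect 2-note slur pairs where note[i] starts a slur that ends at note[i+1],
--     and note[i] is strictly shorter (ornament/appoggiatura).
--     The ornament note is dropped; its duration is added to the main note;
--     onset of the merged note = onset of the ornament (start of the figure).
--     """
--     merged = []
--     i = 0
--     while i < len(notes):
--         if i + 1 < len(notes):
--             a, b = notes[i], notes[i + 1]
--             if slur_ends.get(a[0]) == b[0] and a[3] < b[3]: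
--                 # a is ornament: absorb into b
--                 merged.append((b[0], b[1], b[2], a[3] + b[3], b[4], a[5]))
--                 i += 2
--                 continue
--         merged.append(notes[i])
--         i += 1
--     return merged
-- ===== SOURCE B (Python) =====
-- def _merge_ornamental_slurs(notes, slur_ends):
--     # Pass 1: for each adjacent pair, precompute the merged tuple (or None if the
--     # pair is not an ornamental slur pair); pad with None for the last note.
--     def merged_of(a, b):
--         if slur_ends.get(a[0]) == b[0] and a[3] < b[3]:
--             return (b[0], b[1], b[2], a[3] + b[3], b[4], a[5])
--         return None
--
--     mv = [merged_of(a, b) for a, b in zip(notes, notes[1:])] + [None]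
--     # Pass 2: walk the notes left to right with a skip flag (greedy non-overlap).
--     out = []
--     skip = False
--     for note, m in zip(notes, mv):
--         if skip:
--             skip = False
--         elif m is not None:
--             out.append(m)
--             skip = True
--         else:
--             out.append(note)
--     return out
-- ===== Notes on version B (the rewrite author's own statement) =====
-- stated objective: alternative
-- what changed: Replaces A's index-based while loop with i+=2 jumps by a two-pass scheme: one pass over adjacent pairs precomputes each position's merged tuple (or None), then a single zip-fold with a skip flag emits the result.
import Mathlib
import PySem

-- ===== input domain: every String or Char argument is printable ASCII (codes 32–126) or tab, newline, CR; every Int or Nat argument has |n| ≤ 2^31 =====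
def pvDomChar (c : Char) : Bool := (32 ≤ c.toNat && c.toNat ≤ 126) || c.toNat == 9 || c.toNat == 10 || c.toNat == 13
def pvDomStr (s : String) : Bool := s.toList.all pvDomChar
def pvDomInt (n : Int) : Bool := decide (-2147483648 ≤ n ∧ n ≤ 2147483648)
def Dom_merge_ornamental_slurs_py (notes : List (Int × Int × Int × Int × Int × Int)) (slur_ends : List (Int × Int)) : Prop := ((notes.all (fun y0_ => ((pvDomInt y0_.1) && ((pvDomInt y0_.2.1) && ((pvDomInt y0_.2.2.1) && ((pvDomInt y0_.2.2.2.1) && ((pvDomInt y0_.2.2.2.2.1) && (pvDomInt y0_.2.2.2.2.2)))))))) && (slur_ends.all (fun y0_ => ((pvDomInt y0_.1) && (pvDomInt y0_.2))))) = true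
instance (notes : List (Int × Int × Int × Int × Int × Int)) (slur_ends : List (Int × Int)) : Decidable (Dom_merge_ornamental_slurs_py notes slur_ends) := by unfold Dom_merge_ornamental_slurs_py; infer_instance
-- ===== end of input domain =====

-- B replaces A's index-jumping while loop by two passes (precompute per-pair merged
-- tuples, then a single skip-flag walk); alternative decomposition, same O(n) cost.


-- ===== PORT A =====
-- literal port of A's while loop: look at notes[i], notes[i+1]; merge and jump by 2, else emit and step by 1
def merge_ornamental_slurs_py (notes : List (Int × Int × Int × Int × Int × Int)) (slur_ends : List (Int × Int)) : List (Int × Int × Int × Int × Int × Int) :=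
  match notes with
  | a :: b :: rest =>
    if (PySem.Dict.mk slur_ends).get? a.1 = some b.1 ∧ a.2.2.2.1 < b.2.2.2.1 then
      (b.1, b.2.1, b.2.2.1, a.2.2.2.1 + b.2.2.2.1, b.2.2.2.2.1, a.2.2.2.2.2)
        :: merge_ornamental_slurs_py rest slur_ends
    else
      a :: merge_ornamental_slurs_py (b :: rest) slur_ends
  | xs => xs
termination_by notes.length

-- ===== PORT B =====
-- merged_of(a, b) of Source B
def pvMergedOf (slur_ends : List (Int × Int)) (a b : Int × Int × Int × Int × Int × Int) : Option (Int × Int × Int × Int × Int × Int) :=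
  if (PySem.Dict.mk slur_ends).get? a.1 = some b.1 ∧ a.2.2.2.1 < b.2.2.2.1 then
    some (b.1, b.2.1, b.2.2.1, a.2.2.2.1 + b.2.2.2.1, b.2.2.2.2.1, a.2.2.2.2.2)
  else none

-- pass 1 of Source B: the mv table (merged tuple per adjacent pair, None-padded)
def pvMvList (notes : List (Int × Int × Int × Int × Int × Int)) (slur_ends : List (Int × Int)) : List (Option (Int × Int × Int × Int × Int × Int)) :=
  ((notes.zip notes.tail).map (fun p => pvMergedOf slur_ends p.1 p.2)) ++ [none]

-- the body of pass 2's for loop (state = (skip, out))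
def pvStep (st : Bool × List (Int × Int × Int × Int × Int × Int)) (p : (Int × Int × Int × Int × Int × Int) × Option (Int × Int × Int × Int × Int × Int)) : Bool × List (Int × Int × Int × Int × Int × Int) :=
  if st.1 then (false, st.2)
  else
    match p.2 with
    | some m => (true, st.2 ++ [m])
    | none => (false, st.2 ++ [p.1])

def merge_ornamental_slurs_py_alt (notes : List (Int × Int × Int × Int × Int × Int)) (slur_ends : List (Int × Int)) : List (Int × Int × Int × Int × Int × Int) :=
  ((notes.zip (pvMvList notes slur_ends)).foldl pvStep (false, [])).2

-- ===== PRECONDITION & SPEC =====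
def Spec_merge_ornamental_slurs_py (notes : List (Int × Int × Int × Int × Int × Int)) (slur_ends : List (Int × Int)) (out : List (Int × Int × Int × Int × Int × Int)) : Prop := out = merge_ornamental_slurs_py_alt notes slur_ends
instance (notes : List (Int × Int × Int × Int × Int × Int)) (slur_ends : List (Int × Int)) (out : List (Int × Int × Int × Int × Int × Int)) : Decidable (Spec_merge_ornamental_slurs_py notes slur_ends out) := by unfold Spec_merge_ornamental_slurs_py; infer_instance

-- ===== CLAIM (what is proved, stated in full; the proofs are below) =====
def Claim_equal_merge_ornamental_slurs_py : Prop := ∀ (notes : List (Int × Int × Int × Int × Int × Int)) (slur_ends : List (Int × Int)), Dom_merge_ornamental_slurs_py notes slur_ends → Spec_merge_ornamental_slurs_py notes slur_ends (merge_ornamental_slurs_py notes slur_ends)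

-- ===== LEMMAS AND PROOFS =====
lemma pvMvList_cons_cons (a b : Int × Int × Int × Int × Int × Int) (rest : List (Int × Int × Int × Int × Int × Int)) (slur_ends : List (Int × Int)) :
    pvMvList (a :: b :: rest) slur_ends = pvMergedOf slur_ends a b :: pvMvList (b :: rest) slur_ends := by
  simp [pvMvList]

-- loop invariant: running pass 2 from (skip = false, acc) appends exactly A's output
lemma pv_fold_eq (slur_ends : List (Int × Int)) :
    ∀ (notes : List (Int × Int × Int × Int × Int × Int)) (acc : List (Int × Int × Int × Int × Int × Int)),
      (notes.zip (pvMvList notes slur_ends)).foldl pvStep (false, acc)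
        = (false, acc ++ merge_ornamental_slurs_py notes slur_ends) := by
  intro notes
  induction notes using merge_ornamental_slurs_py.induct slur_ends with
  | case1 a b rest hcond ih =>
    intro acc
    match rest with
    | [] =>
      simp [pvMvList, pvStep, pvMergedOf, hcond, merge_ornamental_slurs_py]
    | c :: cs =>
      rw [pvMvList_cons_cons, pvMvList_cons_cons]
      simp only [List.zip_cons_cons, List.foldl_cons]
      rw [show pvStep (false, acc) (a, pvMergedOf slur_ends a b)
            = (true, acc ++ [(b.1, b.2.1, b.2.2.1, a.2.2.2.1 + b.2.2.2.1, b.2.2.2.2.1, a.2.2.2.2.2)]) by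
          simp [pvStep, pvMergedOf, hcond]]
      rw [show ∀ x, pvStep (true, acc ++ x) (b, pvMergedOf slur_ends b c) = (false, acc ++ x) by
          intro x; simp [pvStep]]
      rw [ih]
      simp [merge_ornamental_slurs_py, hcond]
  | case2 a b rest hcond ih =>
    intro acc
    rw [pvMvList_cons_cons]
    simp only [List.zip_cons_cons, List.foldl_cons]
    rw [show pvStep (false, acc) (a, pvMergedOf slur_ends a b) = (false, acc ++ [a]) by
        simp [pvStep, pvMergedOf, hcond]]
    rw [ih]
    simp [merge_ornamental_slurs_py, hcond]
  | case3 xs h =>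
    intro acc
    rcases xs with _ | ⟨a, _ | ⟨b, rest⟩⟩
    · simp [pvMvList, merge_ornamental_slurs_py]
    · simp [pvMvList, pvStep, merge_ornamental_slurs_py]
    · exact absurd rfl (h a b rest)

-- ===== VERDICT (by name: the statement is the Claim_ definition above) =====
theorem merge_ornamental_slurs_py_spec : Claim_equal_merge_ornamental_slurs_py := by
  intro notes slur_ends _
  unfold Spec_merge_ornamental_slurs_py merge_ornamental_slurs_py_alt
  rw [pv_fold_eq]
  simp
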